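-- pv_equiv track=rewrite | github.com/hoo00nn/Algorithm | Programmers_Lv2/Stack,Queue-쇠막대기(Level2).py | solution
-- ===== SOURCE A (Python) =====
-- def solution(arrangement):
--     answer = 0
--     arrangement = arrangement.replace("()", "L")
--     openBracket = []
--     for i in arrangement:
--         if i == "(":
--             openBracket.append(i)
--             answer += 1
--         elif i == ")":
--             openBracket.pop()
--         else:
--             answer += len(openBracket)
--
--     return answer
-- ===== SOURCE B (Python) =====
-- def solution(arrangement):
--     s = arrangement
--     depths = []          # bracket balance just before each character
--     d = 0
--     for c in s:
--         depths.append(d)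
--         d += (c == "(") - (c == ")")
--     lasers = [d for a, b, d in zip(s, s[1:], depths) if a == "(" and b == ")"]
--     markers = [d for c, d in zip(s, depths) if c != "(" and c != ")"]
--     return s.count("(") - len(lasers) + sum(lasers) + sum(markers)
-- ===== Notes on version B (the rewrite author's own statement) =====
-- stated objective: alternative
-- what changed: Replaces A's stack simulation over a replace("()","L")-preprocessed string by a staged counting formulation: one pass builds the prefix bracket balances, then the answer is the closed-form sum count('(') - #lasers + sum of balances at laser and non-bracket marker positions, with lasers found by zip-adjacency ("()" occurrences cannot overlap, and brackets of earlier lasers cancel in the balance).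
import Mathlib
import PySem

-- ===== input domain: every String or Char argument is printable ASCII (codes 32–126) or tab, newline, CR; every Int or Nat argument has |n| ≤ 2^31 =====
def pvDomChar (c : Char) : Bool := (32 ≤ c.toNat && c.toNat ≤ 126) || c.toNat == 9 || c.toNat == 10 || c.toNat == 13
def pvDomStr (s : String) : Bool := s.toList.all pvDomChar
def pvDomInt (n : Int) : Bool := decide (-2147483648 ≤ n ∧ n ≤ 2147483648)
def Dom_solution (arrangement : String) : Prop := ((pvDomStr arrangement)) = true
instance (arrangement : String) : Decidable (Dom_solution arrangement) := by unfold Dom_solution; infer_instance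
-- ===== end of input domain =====

-- B replaces A's stack simulation over replace("()","L") by a staged counting formulation:
-- prefix balances + a closed-form sum over laser/marker positions (objective: alternative, same O(n)).


-- ===== PORT A =====
-- one loop step: '(' pushes and counts 1; ')' pops (list.pop, last element); anything else adds len(stack)
def solutionStepA (st : Int × List Char) (c : Char) : Int × List Char :=
  if c = '(' then (st.1 + 1, st.2 ++ ['('])
  else if c = ')' then (st.1, st.2.dropLast)   -- Python pop() raises on []; such inputs are outside Pre_
  else (st.1 + st.2.length, st.2)

def solution (arrangement : String) : Int :=
  (((PySem.Str.replace arrangement "()" "L").toList).foldl solutionStepA (0, [])).1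

-- ===== PORT B =====
-- Source B's first loop: the bracket balance just before each character (list built by append)
def depthsLoop : List Char → Int → List Int
  | [], _ => []
  | c :: t, d =>
    d :: depthsLoop t (d + (if c = '(' then 1 else 0) - (if c = ')' then 1 else 0))

-- Source B: two zip-comprehensions over (s, s[1:], depths) and (s, depths), then a closed-form sum
def solution_alt (arrangement : String) : Int :=
  let l := arrangement.toList
  let depths := depthsLoop l 0
  let lasers := ((l.zip (l.drop 1)).zip depths).filterMap
      (fun p => if p.1.1 = '(' ∧ p.1.2 = ')' then some p.2 else none)
  let markers := (l.zip depths).filterMap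
      (fun p => if p.1 ≠ '(' ∧ p.1 ≠ ')' then some p.2 else none)
  ((PySem.Str.count arrangement "(" : Int)) - lasers.length + lasers.sum + markers.sum

-- ===== PRECONDITION & SPEC =====
-- Pre_ excludes exactly the inputs on which A raises IndexError: a ')' that is not the closing
-- half of an adjacent "()" pair (those are removed by A's replace) pops the stack, so each such
-- ')' needs at least as many '(' as ')' up to and including it.
def Pre_solution (arrangement : String) : Prop :=
  ∀ i, i < arrangement.toList.length → arrangement.toList[i]? = some ')' →
    (i = 0 ∨ arrangement.toList[i-1]? ≠ some '(') →
    (arrangement.toList.take (i+1)).count ')' ≤ (arrangement.toList.take (i+1)).count '('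
instance (arrangement : String) : Decidable (Pre_solution arrangement) := by
  unfold Pre_solution; infer_instance

def pvWitness_solution : String := "(()(((()L)x())))"

def Spec_solution (arrangement : String) (out : Int) : Prop := out = solution_alt arrangement
instance (arrangement : String) (out : Int) : Decidable (Spec_solution arrangement out) := by unfold Spec_solution; infer_instance

-- ===== CLAIM (what is proved, stated in full; the proofs are below) =====
def Claim_equal_solution : Prop := ∀ (arrangement : String), Dom_solution arrangement → Pre_solution arrangement → Spec_solution arrangement (solution arrangement)

-- ===== LEMMAS AND PROOFS =====

-- the effect of Python's one-pass replace("()","L") on a character list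
def repl : List Char → List Char
  | [] => []
  | [c] => [c]
  | c :: d :: t => if c = '(' ∧ d = ')' then 'L' :: repl t else c :: repl (d :: t)

theorem replace_go_eq (fuel : Nat) (l acc : List Char) (h : l.length ≤ fuel) :
    PySem.Chars.replace.go ['(', ')'] ['L'] fuel l acc = acc.reverse ++ repl l := by
  induction fuel generalizing l acc with
  | zero =>
    cases l with
    | nil => simp [PySem.Chars.replace.go, repl]
    | cons c t => simp at h
  | succ n ih =>
    cases l with
    | nil => simp [PySem.Chars.replace.go, repl]
    | cons c t =>
      cases t with
      | nil =>
        rw [PySem.Chars.replace.go]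
        have hp : List.isPrefixOf ['(', ')'] [c] = false := by
          simp [List.isPrefixOf]
        simp only [hp, Bool.false_eq_true, if_false]
        rw [ih [] _ (by simp)]
        simp [repl]
      | cons d t' =>
        by_cases hc : c = '(' ∧ d = ')'
        · obtain ⟨hc1, hc2⟩ := hc
          subst hc1; subst hc2
          rw [PySem.Chars.replace.go]
          have hp : List.isPrefixOf ['(', ')'] ('(' :: ')' :: t') = true := by
            simp [List.isPrefixOf]
          simp only [hp, if_true]
          have hd : List.drop (['(', ')'] : List Char).length ('(' :: ')' :: t') = t' := rfl
          rw [hd, ih t' _ (by simp at h ⊢; omega)]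
          simp [repl]
        · rw [PySem.Chars.replace.go]
          have hp : List.isPrefixOf ['(', ')'] (c :: d :: t') = false := by
            simp only [List.isPrefixOf, Bool.and_eq_false_iff]
            rcases (Decidable.not_and_iff_or_not ..).mp hc with h' | h'
            · left; simp only [beq_eq_false_iff_ne, ne_eq]; exact fun hh => h' hh.symm
            · right; left; simp only [beq_eq_false_iff_ne, ne_eq]; exact fun hh => h' hh.symm
          simp only [hp, Bool.false_eq_true, if_false]
          rw [ih (d :: t') _ (by simp at h ⊢; omega)]
          rw [repl]
          simp [hc]

theorem replace_eq_repl (l : List Char) :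
    PySem.Chars.replace l ['(', ')'] ['L'] = repl l := by
  rw [PySem.Chars.replace]
  simp only [List.isEmpty_cons, Bool.false_eq_true, if_false]
  exact replace_go_eq l.length l [] le_rfl

-- Python str.count of the one-character needle "(" is the character count
theorem count_go_eq (fuel : Nat) (l : List Char) (acc : Nat) (h : l.length ≤ fuel) :
    PySem.Chars.count.go ['('] fuel l acc = acc + l.count '(' := by
  induction fuel generalizing l acc with
  | zero =>
    cases l with
    | nil => simp [PySem.Chars.count.go]
    | cons c t => simp at h
  | succ n ih =>
    cases l with
    | nil => simp [PySem.Chars.count.go]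
    | cons c t =>
      rw [PySem.Chars.count.go]
      by_cases hc : c = '('
      · subst hc
        have hp : List.isPrefixOf ['('] ('(' :: t) = true := by simp [List.isPrefixOf]
        simp only [hp, if_true]
        have hd : List.drop (['('] : List Char).length ('(' :: t) = t := rfl
        rw [hd, ih t _ (by simp at h ⊢; omega)]
        simp [List.count_cons]
        omega
      · have hp : List.isPrefixOf ['('] (c :: t) = false := by
          simp [List.isPrefixOf]
          exact fun hh => hc hh.symm
        simp only [hp, Bool.false_eq_true, if_false]
        rw [ih t _ (by simp at h ⊢; omega)]
        simp [List.count_cons, hc]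

theorem count_eq_charCount (l : List Char) :
    PySem.Chars.count l ['('] = l.count '(' := by
  rw [PySem.Chars.count]
  rw [if_neg (by simp)]
  simpa using count_go_eq l.length l 0 le_rfl

-- common spec of both programs, following the shape of repl's pairing
def T : List Char → Int → Int
  | [], _ => 0
  | [c], d => if c = '(' then 1 else if c = ')' then 0 else d
  | c :: e :: t, d =>
    if c = '(' ∧ e = ')' then d + T t d
    else if c = '(' then 1 + T (e :: t) (d + 1)
    else if c = ')' then T (e :: t) (d - 1)
    else d + T (e :: t) d

-- stack-safety invariant for A's loop, phrased on the raw input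
def Ok : List Char → Nat → Prop
  | [], _ => True
  | [c], d => if c = ')' then 1 ≤ d else True
  | c :: e :: t, d =>
    if c = '(' ∧ e = ')' then Ok t d
    else if c = '(' then Ok (e :: t) (d + 1)
    else if c = ')' then 1 ≤ d ∧ Ok (e :: t) (d - 1)
    else Ok (e :: t) d

-- A's fold over the replaced string computes T
theorem a_side : ∀ (l : List Char) (ans : Int) (stack : List Char),
    Ok l stack.length →
    ((repl l).foldl solutionStepA (ans, stack)).1 = ans + T l stack.length := by
  intro l
  induction l using repl.induct with
  | case1 =>
    intro ans stack _
    simp [repl, T]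
  | case2 c =>
    intro ans stack hok
    by_cases hc : c = '('
    · subst hc; simp [repl, T, solutionStepA]
    · by_cases hc2 : c = ')'
      · subst hc2; simp [repl, T, solutionStepA]
      · simp [repl, T, solutionStepA, hc, hc2]
  | case3 c d t hcd ih =>
    intro ans stack hok
    obtain ⟨hc, hd⟩ := hcd
    subst hc; subst hd
    have hokt : Ok t stack.length := by simpa [Ok] using hok
    have hstep : repl ('(' :: ')' :: t) = 'L' :: repl t := by rw [repl]; simp
    rw [hstep]
    have hA : solutionStepA (ans, stack) 'L' = (ans + stack.length, stack) := by
      simp [solutionStepA]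
    simp only [List.foldl_cons, hA]
    rw [ih (ans + stack.length) stack hokt]
    simp [T]
    ring
  | case4 c d t hcd ih =>
    intro ans stack hok
    have hstep : repl (c :: d :: t) = c :: repl (d :: t) := by rw [repl]; simp [hcd]
    rw [hstep]
    by_cases hc : c = '('
    · subst hc
      have hdne : d ≠ ')' := fun h => hcd ⟨rfl, h⟩
      have hokt : Ok (d :: t) (stack.length + 1) := by
        simpa [Ok, hdne] using hok
      have hA : solutionStepA (ans, stack) '(' = (ans + 1, stack ++ ['(']) := by
        simp [solutionStepA]
      simp only [List.foldl_cons, hA]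
      rw [ih (ans + 1) (stack ++ ['(']) (by simpa using hokt)]
      simp [T, hdne]
      ring
    · by_cases hc2 : c = ')'
      · subst hc2
        have hd1 : 1 ≤ stack.length ∧ Ok (d :: t) (stack.length - 1) := by
          have hne : ¬(')' = '(' ∧ d = ')') := by simp
          simpa [Ok, hne] using hok
        have hA : solutionStepA (ans, stack) ')' = (ans, stack.dropLast) := by
          simp [solutionStepA]
        simp only [List.foldl_cons, hA]
        rw [ih ans stack.dropLast (by simpa [List.length_dropLast] using hd1.2)]
        have hcast : ((stack.dropLast.length : Nat) : Int) = (stack.length : Int) - 1 := by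
          have := hd1.1
          simp only [List.length_dropLast]
          omega
        rw [hcast]
        simp [T]
      · have hokt : Ok (d :: t) stack.length := by
          have hne : ¬(c = '(' ∧ d = ')') := hcd
          simpa [Ok, hne, hc, hc2] using hok
        have hA : solutionStepA (ans, stack) c = (ans + stack.length, stack) := by
          simp [solutionStepA, hc, hc2]
        simp only [List.foldl_cons, hA]
        rw [ih (ans + stack.length) stack hokt]
        simp [T, hc, hc2]
        ring

-- B's staged sums, over an arbitrary starting balance
def Bval (l : List Char) (d : Int) : Int :=
  (l.count '(' : Int)
    - (((l.zip (l.drop 1)).zip (depthsLoop l d)).filterMap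
        (fun p => if p.1.1 = '(' ∧ p.1.2 = ')' then some p.2 else none)).length
    + (((l.zip (l.drop 1)).zip (depthsLoop l d)).filterMap
        (fun p => if p.1.1 = '(' ∧ p.1.2 = ')' then some p.2 else none)).sum
    + ((l.zip (depthsLoop l d)).filterMap
        (fun p => if p.1 ≠ '(' ∧ p.1 ≠ ')' then some p.2 else none)).sum

-- B's staged computation also computes T
theorem b_side : ∀ (l : List Char) (d : Int), Bval l d = T l d := by
  intro l
  induction l using repl.induct with
  | case1 => intro d; simp [Bval, T, depthsLoop]
  | case2 c =>
    intro d
    by_cases hc : c = '('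
    · subst hc; simp [Bval, T, depthsLoop]
    · by_cases hc2 : c = ')'
      · subst hc2; simp [Bval, T, depthsLoop]
      · simp [Bval, T, depthsLoop, hc, hc2]
  | case3 c e t hce ih =>
    intro d
    obtain ⟨hc, he⟩ := hce
    subst hc; subst he
    have hdl : depthsLoop ('(' :: ')' :: t) d = d :: (d + 1) :: depthsLoop t d := by
      simp [depthsLoop]
    cases t with
    | nil =>
      simp [Bval, T, depthsLoop]
    | cons e' t' =>
      have ihs := ih d
      simp only [Bval, List.drop_succ_cons, List.drop_zero] at ihs
      push_cast [List.count_cons] at ihs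
      have hT : T ('(' :: ')' :: e' :: t') d = d + T (e' :: t') d := by
        rw [T]; norm_num
      simp only [Bval, hdl, List.drop_succ_cons, List.drop_zero, List.zip_cons_cons, hT]
      rw [List.filterMap_cons_some (b := d) (by simp), List.filterMap_cons_none (by simp),
        List.filterMap_cons_none (by simp), List.filterMap_cons_none (by simp)]
      push_cast [List.count_cons]
      simp only [ne_eq] at ihs ⊢
      simp only [List.sum_cons, List.length_cons]
      push_cast
      linarith [ihs]
  | case4 c e t hce ih =>
    intro d
    have ihs : ∀ d', Bval (e :: t) d' = T (e :: t) d' := ih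
    by_cases hc : c = '('
    · subst hc
      have hene : e ≠ ')' := fun h => hce ⟨rfl, h⟩
      have hdl : depthsLoop ('(' :: e :: t) d = d :: depthsLoop (e :: t) (d + 1) := by
        simp [depthsLoop]
      have := (ihs (d + 1)).symm
      simp only [Bval] at this
      simp only [Bval, hdl, List.drop_succ_cons, List.drop_zero, List.zip_cons_cons,
        List.filterMap_cons, List.count_cons, T, hene]
      simp only [this]
      push_cast [List.count_cons]
      simp
      try ring
      try (split_ifs <;> ring)
    · by_cases hc2 : c = ')'
      · subst hc2
        have hdl : depthsLoop (')' :: e :: t) d = d :: depthsLoop (e :: t) (d - 1) := by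
          simp [depthsLoop]
        have := (ihs (d - 1)).symm
        simp only [Bval] at this
        simp only [Bval, hdl, List.drop_succ_cons, List.drop_zero, List.zip_cons_cons,
          List.filterMap_cons, List.count_cons, T]
        simp only [this]
        push_cast [List.count_cons]
        simp
        try ring
        try (split_ifs <;> ring)
      · have hdl : depthsLoop (c :: e :: t) d = d :: depthsLoop (e :: t) d := by
          simp [depthsLoop, hc, hc2]
        have hne : ¬(c = '(' ∧ e = ')') := hce
        have := (ihs d).symm
        simp only [Bval] at this
        simp only [Bval, hdl, List.drop_succ_cons, List.drop_zero, List.zip_cons_cons,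
          List.filterMap_cons, List.count_cons, T, hc, hc2]
        simp only [this]
        push_cast [List.count_cons]
        simp [hc, hc2]
        try ring
        try (split_ifs <;> ring)

theorem alt_eq_T (s : String) : solution_alt s = T s.toList 0 := by
  rw [← b_side s.toList 0]
  unfold solution_alt Bval
  rw [PySem.Str.count_eq]
  have h1 : ("(" : String).toList = ['('] := rfl
  rw [h1, count_eq_charCount]

theorem pre_ok : ∀ (l : List Char) (d : Nat),
    (∀ i, i < l.length → l[i]? = some ')' → (i = 0 ∨ l[i-1]? ≠ some '(') →
      (l.take (i+1)).count ')' ≤ (l.take (i+1)).count '(' + d) →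
    Ok l d := by
  intro l
  induction l using repl.induct with
  | case1 => intro d _; trivial
  | case2 c =>
    intro d hyp
    by_cases hc : c = ')'
    · subst hc
      have := hyp 0 (by simp) (by simp) (Or.inl rfl)
      simp at this
      simpa [Ok] using this
    · simp [Ok, hc]
  | case3 c e t hce ih =>
    intro d0 hyp
    obtain ⟨hc, he⟩ := hce
    subst hc; subst he
    have hokt : Ok t d0 := by
      apply ih
      intro i hi h1 h2
      have := hyp (i + 2) (by simpa using hi) (by simpa using h1)
        (by
          right
          cases i with
          | zero => simp
          | succ j => simpa using h2.resolve_left (by omega))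
      simp only [List.take_succ_cons, List.count_cons] at this
      simp at this
      omega
    simp [Ok, hokt]
  | case4 c e t hce ih =>
    intro d0 hyp
    by_cases hc : c = '('
    · subst hc
      have hene : e ≠ ')' := fun h => hce ⟨rfl, h⟩
      have hokt : Ok (e :: t) (d0 + 1) := by
        apply ih
        intro i hi h1 h2
        cases i with
        | zero =>
          exact absurd h1 (by simpa using hene)
        | succ j =>
          have := hyp (j + 2) (by simpa using hi) (by simpa using h1)
            (by
              right
              simpa using h2.resolve_left (by omega))
          simp only [List.take_succ_cons, List.count_cons] at this ⊢
          simp at this ⊢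
          omega
      simp [Ok, hene, hokt]
    · by_cases hc2 : c = ')'
      · subst hc2
        have h0 := hyp 0 (by simp) (by simp) (Or.inl rfl)
        simp at h0
        have hokt : Ok (e :: t) (d0 - 1) := by
          apply ih
          intro i hi h1 h2
          have := hyp (i + 1) (by simpa using hi) (by simpa using h1)
            (by
              cases i with
              | zero => right; simp
              | succ j => right; simpa using h2.resolve_left (by omega))
          simp only [List.take_succ_cons, List.count_cons] at this ⊢
          simp at this ⊢
          omega
        simp [Ok, h0, hokt]
      · have hokt : Ok (e :: t) d0 := by
          apply ih
          intro i hi h1 h2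
          have := hyp (i + 1) (by simpa using hi) (by simpa using h1)
            (by
              cases i with
              | zero => right; simpa using hc
              | succ j => right; simpa using h2.resolve_left (by omega))
          simp only [List.take_succ_cons, List.count_cons] at this ⊢
          simp [hc, hc2] at this ⊢
          omega
        simp [Ok, hc, hc2, hokt]

-- ===== VERDICT (by name: the statement is the Claim_ definition above) =====
theorem solution_spec : Claim_equal_solution := by
  intro s _ hpre
  unfold Spec_solution solution
  rw [PySem.Str.toList_replace]
  have h1 : ("()" : String).toList = ['(', ')'] := rfl
  have h2 : ("L" : String).toList = ['L'] := rfl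
  rw [h1, h2, replace_eq_repl, alt_eq_T]
  have hok : Ok s.toList 0 := by
    apply pre_ok
    intro i hi ha hb
    simpa using hpre i hi ha hb
  have := a_side s.toList 0 [] hok
  simpa using this
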